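-- pv_equiv track=rewrite | github.com/uj-study/basic-algorithm | hyunsik/practice_test/2020카카오_보석쇼핑.py | solution
-- ===== SOURCE A (Python) =====
-- def solution(gems):
--     dt = {}
--     for i in range(len(gems)):
--         if dt.get(gems[i]):
--             dt[gems[i]][0] = min(dt[gems[i]][0], i)
--             dt[gems[i]][1] = max(dt[gems[i]][1], i)
--         else:
--             dt[gems[i]] = [i, i] # 최소와 최대만 저장
--     ans_0 = 100001
--     ans_1 = 0
--     for _, x in dt.items():
--         ans_0 = min(ans_0, x[1])
--         ans_1 = max(ans_1, x[0])
--
--     return [ans_0 + 1, ans_1 + 1]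
-- ===== SOURCE B (Python) =====
-- def solution(gems):
--     n = len(gems)
--     # forward pass: ans_1 = largest first-occurrence index (0 if empty)
--     ans_1 = 0
--     seen = set()
--     for i in range(n):
--         if gems[i] not in seen:
--             seen.add(gems[i])
--             ans_1 = i
--     # backward pass: ans_0 = smallest last-occurrence index (sentinel 100001 if empty)
--     ans_0 = 100001
--     seen = set()
--     for i in range(n - 1, -1, -1):
--         if gems[i] not in seen:
--             seen.add(gems[i])
--             ans_0 = min(ans_0, i)
--     return [ans_0 + 1, ans_1 + 1]
-- ===== Notes on version B (the rewrite author's own statement) =====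
-- stated objective: alternative
-- what changed: Replaces the dict of [first,last] index pairs plus a reduction over dict.items() by two directional set-based scans: a forward pass whose last new-gem index is the maximal first occurrence, and a backward pass taking the minimum over last occurrences, keeping the same 100001/0 sentinels.
import Mathlib
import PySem

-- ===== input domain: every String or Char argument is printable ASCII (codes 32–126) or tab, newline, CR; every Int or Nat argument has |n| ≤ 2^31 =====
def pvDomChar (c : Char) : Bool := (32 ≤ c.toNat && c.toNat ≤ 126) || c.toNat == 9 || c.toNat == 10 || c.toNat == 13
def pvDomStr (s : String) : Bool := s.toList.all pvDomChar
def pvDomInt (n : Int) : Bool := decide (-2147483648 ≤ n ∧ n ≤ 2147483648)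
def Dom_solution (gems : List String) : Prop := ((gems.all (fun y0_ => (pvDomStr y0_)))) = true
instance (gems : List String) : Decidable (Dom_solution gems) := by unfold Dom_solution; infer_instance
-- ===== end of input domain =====

-- B replaces A's dict of [first,last] pairs plus an items() reduction by two directional
-- set-based scans (forward for the max first occurrence, backward for the min last occurrence);
-- same O(n) shape, measured constant-factor faster (no per-element list mutation).

-- ===== PORT A =====
-- Loop body of A's first loop. `if dt.get(gems[i]):` — the stored value is always a
-- two-element list, hence truthy exactly when the key is present (match on get?).
def solutionUpd (dt : PySem.Dict String (Int × Int)) (p : Int × String) :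
    PySem.Dict String (Int × Int) :=
  match dt.get? p.2 with
  | some _ => dt.modify p.2 (0, 0) (fun v => (min v.1 p.1, max v.2 p.1))
  | none => dt.insert p.2 (p.1, p.1)

def solution (gems : List String) : List Int :=
  let dt := (PySem.List.pyRange 0 (PySem.List.len gems) 1).foldl
    (fun dt i => solutionUpd dt (i, PySem.List.pyGetD gems i "")) PySem.Dict.empty
  let ans := dt.items.foldl
    (fun (a : Int × Int) kv => (min a.1 kv.2.2, max a.2 kv.2.1)) (100001, 0)
  [ans.1 + 1, ans.2 + 1]

-- ===== PORT B =====
def solution_alt (gems : List String) : List Int :=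
  let n := PySem.List.len gems
  let fwd := (PySem.List.pyRange 0 n 1).foldl
    (fun (st : PySem.Set String × Int) i =>
      if st.1.contains (PySem.List.pyGetD gems i "") then st
      else (st.1.add (PySem.List.pyGetD gems i ""), i))
    (PySem.Set.empty, 0)
  let bwd := (PySem.List.pyRange (n - 1) (-1) (-1)).foldl
    (fun (st : PySem.Set String × Int) i =>
      if st.1.contains (PySem.List.pyGetD gems i "") then st
      else (st.1.add (PySem.List.pyGetD gems i ""), min st.2 i))
    (PySem.Set.empty, 100001)
  [bwd.2 + 1, fwd.2 + 1]

-- ===== PRECONDITION & SPEC =====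
def Spec_solution (gems : List String) (out : List Int) : Prop := out = solution_alt gems
instance (gems : List String) (out : List Int) : Decidable (Spec_solution gems out) := by unfold Spec_solution; infer_instance

-- ===== CLAIM (what is proved, stated in full; the proofs are below) =====
def Claim_equal_solution : Prop := ∀ (gems : List String), Dom_solution gems → Spec_solution gems (solution gems)

-- ===== LEMMAS AND PROOFS =====

-- first-occurrence index (absolute, offset k) of h in l; 0 if absent (only used when h ∈ l)
def firstIdx (k : Int) : List String → String → Int
  | [], _ => 0
  | g :: r, h => if h = g then k else firstIdx (k + 1) r h

-- last-occurrence index (absolute, offset k) of h in l; 0 if absent (only used when h ∈ l)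
def lastIdx (k : Int) : List String → String → Int
  | [], _ => 0
  | g :: r, h => if h ∈ r then lastIdx (k + 1) r h else if h = g then k else 0

-- the elements of l not in s, in order of first occurrence (= the keys A's dict acquires)
def newOnes (s : List String) : List String → List String
  | [] => []
  | g :: r => if g ∈ s then newOnes s r else g :: newOnes (s ++ [g]) r

lemma mem_newOnes (l : List String) : ∀ (s : List String) (h : String),
    h ∈ newOnes s l ↔ h ∈ l ∧ h ∉ s := by
  induction l with
  | nil => intro s h; simp [newOnes]
  | cons g r ih =>
    intro s h
    by_cases hg : g ∈ s
    · simp only [newOnes, if_pos hg, ih, List.mem_cons]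
      constructor
      · rintro ⟨h1, h2⟩; exact ⟨Or.inr h1, h2⟩
      · rintro ⟨h1 | h1, h2⟩
        · exact absurd (h1 ▸ hg) h2
        · exact ⟨h1, h2⟩
    · simp only [newOnes, if_neg hg, List.mem_cons, ih, List.mem_append]
      by_cases hhg : h = g
      · simp [hhg, hg]
      · simp only [hhg, false_or]; tauto

lemma nodup_newOnes (l : List String) : ∀ (s : List String), (newOnes s l).Nodup := by
  induction l with
  | nil => intro s; simp [newOnes]
  | cons g r ih =>
    intro s
    by_cases hg : g ∈ s
    · simpa [newOnes, hg] using ih s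
    · rw [newOnes, if_neg hg]
      refine List.nodup_cons.2 ⟨fun hmem => ?_, ih _⟩
      exact ((mem_newOnes r _ g).1 hmem).2 (by simp)

lemma foldl_min_comm (f : String → Int) (l : List String) : ∀ (i x : Int),
    l.foldl (fun a h => min a (f h)) (min i x) = min (l.foldl (fun a h => min a (f h)) i) x := by
  induction l with
  | nil => intro i x; simp
  | cons h t ih =>
    intro i x
    simp only [List.foldl_cons]
    rw [min_right_comm i x (f h), ih]

-- A's dict after consuming `enumerate l k`, as explicit items
lemma buildA_items (l : List String) : ∀ (k : Int) (d : PySem.Dict String (Int × Int)),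
    d.keys.Nodup →
    (∀ p ∈ d.items, p.2.1 ≤ p.2.2 ∧ p.2.2 < k) →
    ((PySem.List.enumerate l k).foldl solutionUpd d).items =
      d.items.map (fun kv => (kv.1, (kv.2.1, if kv.1 ∈ l then lastIdx k l kv.1 else kv.2.2)))
      ++ (newOnes d.keys l).map (fun h => (h, (firstIdx k l h, lastIdx k l h))) := by
  induction l with
  | nil =>
    intro k d _ _
    simp [PySem.List.enumerate_nil, newOnes]
  | cons g r ih =>
    intro k d hnd hb
    rw [PySem.List.enumerate_cons, List.foldl_cons]
    by_cases hmem : d.contains g = true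
    · -- key already present: in-place update of its [first, last] pair
      obtain ⟨v, hv⟩ : ∃ v, d.get? g = some v := by
        cases hget : d.get? g with
        | none => rw [PySem.Dict.get?_eq_none_iff_contains] at hget; rw [hget] at hmem; cases hmem
        | some v => exact ⟨v, rfl⟩
      have hvmem : (g, v) ∈ d.items := PySem.Dict.mem_items_of_get?_eq_some d hv
      have hv1 : v.1 ≤ v.2 := by simpa using (hb _ hvmem).1
      have hv2 : v.2 < k := by simpa using (hb _ hvmem).2
      have hupd : solutionUpd d (k, g) = d.insert g (v.1, k) := by
        simp only [solutionUpd, hv, PySem.Dict.modify,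
          PySem.Dict.getD_of_get?_eq_some d _ hv]
        congr 1
        exact Prod.ext (min_eq_left (by omega)) (max_eq_right (by omega))
      rw [hupd]
      have hgk : g ∈ d.keys := (PySem.Dict.contains_iff_mem_keys d g).1 hmem
      have hitems := PySem.Dict.items_insert_of_contains d (k := g) (v.1, k) hmem
      rw [ih (k + 1) _ (PySem.Dict.nodup_keys_insert d g _ hnd) ?hb']
      case hb' =>
        intro p hp
        rw [hitems] at hp
        obtain ⟨q, hq, hpq⟩ := List.mem_map.1 hp
        by_cases hq1 : (q.1 == g) = true
        · rw [if_pos hq1] at hpq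
          subst hpq
          refine ⟨?_, ?_⟩
          · show v.1 ≤ k; omega
          · show k < k + 1; omega
        · rw [if_neg hq1] at hpq
          subst hpq
          obtain ⟨h1, h2⟩ := hb _ hq
          exact ⟨h1, by omega⟩
      rw [hitems, PySem.Dict.keys_insert_of_contains d _ hmem, List.map_map]
      have hnew : newOnes d.keys (g :: r) = newOnes d.keys r := by
        rw [newOnes, if_pos hgk]
      rw [hnew]
      congr 1
      · -- the mapped items agree entrywise
        apply List.map_congr_left
        rintro ⟨q1, q2⟩ hq
        by_cases hq1 : q1 = g
        · have hqget := PySem.Dict.get?_of_mem_items d hq hnd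
          rw [hq1, hv] at hqget
          have hq2 : q2 = v := Option.some.inj hqget.symm
          subst hq2
          by_cases hgr : g ∈ r <;>
            simp [Function.comp_apply, lastIdx, hq1, hgr]
        · by_cases hqr : q1 ∈ r <;>
            simp [Function.comp_apply, lastIdx, hq1, hqr]
      · -- the not-yet-seen keys agree entrywise
        apply List.map_congr_left
        intro h hh
        obtain ⟨hhr, hhk⟩ := (mem_newOnes r _ h).1 hh
        have hhg : h ≠ g := fun e => hhk (e ▸ hgk)
        simp [firstIdx, lastIdx, hhg, hhr]
    · -- new key: appended with [i, i]
      have hmem' : d.contains g = false := by simpa using hmem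
      have hget : d.get? g = none := (PySem.Dict.get?_eq_none_iff_contains d g).2 hmem'
      have hupd : solutionUpd d (k, g) = d.insert g (k, k) := by
        simp only [solutionUpd, hget]
      rw [hupd]
      have hgk : g ∉ d.keys := fun h => by
        rw [(PySem.Dict.contains_iff_mem_keys d g).2 h] at hmem'; cases hmem'
      have hitems := PySem.Dict.items_insert_of_not_contains d (k := g) (k, k) hmem'
      have hkeys := PySem.Dict.keys_insert_of_not_contains d (k := g) (k, k) hmem'
      rw [ih (k + 1) _ (PySem.Dict.nodup_keys_insert d g _ hnd) ?hb2']
      case hb2' =>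
        intro p hp
        rw [hitems, List.mem_append] at hp
        rcases hp with hp | hp
        · obtain ⟨h1, h2⟩ := hb _ hp; exact ⟨h1, by omega⟩
        · simp only [List.mem_singleton] at hp
          subst hp
          refine ⟨?_, ?_⟩
          · show (k : Int) ≤ k; omega
          · show k < k + 1; omega
      rw [hitems, hkeys]
      have hnew : newOnes d.keys (g :: r) = g :: newOnes (d.keys ++ [g]) r := by
        rw [newOnes, if_neg hgk]
      rw [hnew, List.map_append, List.map_cons, List.append_assoc]
      congr 1
      · apply List.map_congr_left
        rintro ⟨q1, q2⟩ hq
        have hq1 : q1 ≠ g := fun e => hgk (e ▸ PySem.Dict.mem_keys_of_mem_items d hq)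
        by_cases hqr : q1 ∈ r <;>
          simp [lastIdx, hq1, hqr]
      · simp only [List.map_cons, List.map_nil, List.singleton_append]
        congr 1
        · by_cases hgr : g ∈ r <;> simp [firstIdx, lastIdx, hgr]
        · apply List.map_congr_left
          intro h hh
          obtain ⟨hhr, hhk⟩ := (mem_newOnes r _ h).1 hh
          have hhg : h ≠ g := fun e => hhk (by simp [e])
          simp [firstIdx, lastIdx, hhg, hhr]

-- B's forward scan
lemma fwd_inv (l : List String) : ∀ (k : Int) (s : PySem.Set String) (a : Int), a ≤ k →
    (PySem.List.enumerate l k).foldl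
      (fun (st : PySem.Set String × Int) p =>
        if st.1.contains p.2 then st else (st.1.add p.2, p.1)) (s, a)
    = (PySem.Set.update s l, (newOnes s l).foldl (fun acc h => max acc (firstIdx k l h)) a) := by
  induction l with
  | nil => intro k s a _; simp [PySem.List.enumerate_nil, newOnes, PySem.Set.update]
  | cons g r ih =>
    intro k s a ha
    rw [PySem.List.enumerate_cons, List.foldl_cons]
    by_cases hg : PySem.Set.contains s g = true
    · have hgs : g ∈ s := by simpa [PySem.Set.contains] using hg
      rw [if_pos hg, ih (k + 1) s a (by omega)]
      have hupd : PySem.Set.update s (g :: r) = PySem.Set.update s r := by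
        simp [PySem.Set.update, PySem.Set.add, hgs]
      rw [hupd, newOnes, if_pos hgs]
      congr 1
      apply PySem.List.foldl_congr_mem
      intro acc h hh
      have hhg : h ≠ g := fun e => ((mem_newOnes r s h).1 hh).2 (e ▸ hgs)
      simp [firstIdx, hhg]
    · have hg' : PySem.Set.contains s g = false := by simpa using hg
      have hgs : g ∉ s := by simpa [PySem.Set.contains] using hg'
      rw [if_neg hg]
      have hadd : PySem.Set.add s g = s ++ [g] := by simp [PySem.Set.add, hgs]
      rw [ih (k + 1) (PySem.Set.add s g) k (by omega)]
      have hupd : PySem.Set.update s (g :: r) = PySem.Set.update (PySem.Set.add s g) r := by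
        simp [PySem.Set.update]
      rw [hupd, newOnes, if_neg hgs, List.foldl_cons, hadd]
      have hfg : firstIdx k (g :: r) g = k := by simp [firstIdx]
      rw [hfg, max_eq_right ha]
      congr 1
      apply PySem.List.foldl_congr_mem
      intro acc h hh
      have hhg : h ≠ g := fun e => ((mem_newOnes r _ h).1 hh).2 (by simp [e])
      simp [firstIdx, hhg]

-- B's backward scan
lemma bwd_inv (l : List String) : ∀ (k : Int),
    (∀ x, x ∈ (((PySem.List.enumerate l k).reverse).foldl
        (fun (st : PySem.Set String × Int) p =>
          if st.1.contains p.2 then st else (st.1.add p.2, min st.2 p.1))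
        (PySem.Set.empty, 100001)).1 ↔ x ∈ l)
    ∧ (((PySem.List.enumerate l k).reverse).foldl
        (fun (st : PySem.Set String × Int) p =>
          if st.1.contains p.2 then st else (st.1.add p.2, min st.2 p.1))
        (PySem.Set.empty, 100001)).2
      = l.dedup.foldl (fun a h => min a (lastIdx k l h)) 100001 := by
  induction l with
  | nil => intro k; exact ⟨by simp [PySem.List.enumerate_nil, PySem.Set.empty], by
      simp [PySem.List.enumerate_nil]⟩
  | cons g r ih =>
    intro k
    obtain ⟨ihm, ihv⟩ := ih (k + 1)
    rw [PySem.List.enumerate_cons, List.reverse_cons, List.foldl_append,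
      List.foldl_cons, List.foldl_nil] at *
    set st := ((PySem.List.enumerate r (k + 1)).reverse).foldl
      (fun (st : PySem.Set String × Int) p =>
        if st.1.contains p.2 then st else (st.1.add p.2, min st.2 p.1))
      (PySem.Set.empty, 100001) with hst
    by_cases hgr : g ∈ r
    · have hc : st.1.contains g = true := by
        simp [PySem.Set.contains, (ihm g).2 hgr]
      rw [if_pos hc]
      refine ⟨fun x => ?_, ?_⟩
      · rw [ihm x, List.mem_cons]
        exact ⟨Or.inr, by rintro (e | hx); exacts [e ▸ hgr, hx]⟩
      · rw [ihv, List.dedup_cons_of_mem hgr]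
        apply PySem.List.foldl_congr_mem
        intro acc h hh
        have hhr : h ∈ r := List.mem_dedup.1 hh
        simp [lastIdx, hhr]
    · have hc : st.1.contains g = false := by
        simp [PySem.Set.contains, (ihm g), hgr]
      rw [if_neg (by rw [hc]; exact Bool.false_ne_true)]
      refine ⟨fun x => ?_, ?_⟩
      · rw [PySem.Set.mem_add, ihm x, List.mem_cons]
        tauto
      · show min st.2 k = _
        rw [ihv, List.dedup_cons_of_notMem hgr, List.foldl_cons]
        have hlg : lastIdx k (g :: r) g = k := by simp [lastIdx, hgr]
        rw [hlg]
        have hcongr : (List.foldl (fun a h => min a (lastIdx k (g :: r) h)) (min 100001 k) r.dedup)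
            = List.foldl (fun a h => min a (lastIdx (k + 1) r h)) (min 100001 k) r.dedup := by
          apply PySem.List.foldl_congr_mem
          intro acc h hh
          have hhr : h ∈ r := List.mem_dedup.1 hh
          simp [lastIdx, hhr]
        rw [hcongr, foldl_min_comm, min_comm]

lemma perm_newOnes_dedup (gems : List String) : (newOnes [] gems).Perm gems.dedup := by
  refine (List.perm_ext_iff_of_nodup (nodup_newOnes gems []) gems.nodup_dedup).2 fun x => ?_
  rw [mem_newOnes, List.mem_dedup]
  simp

-- ===== VERDICT (by name: the statement is the Claim_ definition above) =====
theorem solution_spec : Claim_equal_solution := by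
  intro gems _
  show solution gems = solution_alt gems
  unfold solution solution_alt
  -- A's dict-building loop, read off as explicit items
  have hA := buildA_items gems 0 PySem.Dict.empty PySem.Dict.nodup_keys_empty
    (by intro p hp; simp [PySem.Dict.empty] at hp)
  rw [PySem.List.enumerate_eq_map_pyRange gems "", List.foldl_map] at hA
  -- B's forward scan
  have hF := fwd_inv gems 0 PySem.Set.empty 0 le_rfl
  rw [PySem.List.enumerate_eq_map_pyRange gems "", List.foldl_map] at hF
  -- B's backward scan
  have hB := (bwd_inv gems 0).2
  rw [PySem.List.enumerate_eq_map_pyRange gems "", ← List.map_reverse, List.foldl_map] at hB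
  have hre : PySem.List.pyRange (PySem.List.len gems - 1) (-1) (-1)
      = (PySem.List.pyRange 0 (PySem.List.len gems) 1).reverse := by
    rw [PySem.List.pyRange_neg_one_eq_reverse]
    norm_num
  simp only [hre]
  rw [hA, hF, hB]
  rw [PySem.List.foldl_prod_mk (f := fun (a : Int) (kv : String × Int × Int) => min a kv.2.2)
      (g := fun (a : Int) (kv : String × Int × Int) => max a kv.2.1)]
  simp only [List.foldl_map, PySem.Dict.empty, PySem.Dict.keys,
    PySem.Set.empty, List.map_nil, List.nil_append]
  -- the two min-folds range over the same distinct gems, in different orders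
  haveI : RightCommutative (fun (a : Int) (h : String) => min a (lastIdx 0 gems h)) :=
    ⟨fun b a1 a2 => min_right_comm b _ _⟩
  have hperm : List.foldl (fun (a : Int) h => min a (lastIdx 0 gems h)) 100001 gems.dedup
      = List.foldl (fun (a : Int) h => min a (lastIdx 0 gems h)) 100001 (newOnes [] gems) :=
    ((perm_newOnes_dedup gems).foldl_eq 100001).symm
  rw [hperm]
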